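-- pv_equiv track=rewrite | github.com/KLGR123/latex2word | latex2word/rendering/table.py | _spec_skip_braced
-- ===== SOURCE A (Python) =====
-- def _spec_skip_braced(spec: str, i: int) -> int:
--     """Advance past a brace-balanced {...} starting at spec[i] == '{'."""
--     if i >= len(spec) or spec[i] != '{':
--         return i
--     depth = 0
--     while i < len(spec):
--         if spec[i] == '{':
--             depth += 1
--         elif spec[i] == '}':
--             depth -= 1
--             if depth == 0:
--                 return i + 1
--         i += 1
--     return i
-- ===== SOURCE B (Python) =====
-- def _skip(spec, j):
--     """Assuming spec[j] == '{', return the index just past its matching '}',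
--     or len(spec) if the group is never closed."""
--     n = len(spec)
--     k = j + 1
--     while k < n:
--         c = spec[k]
--         if c == '}':
--             return k + 1
--         if c == '{':
--             k = _skip(spec, k)
--         else:
--             k += 1
--     return k
--
--
-- def _spec_skip_braced(spec: str, i: int) -> int:
--     """Advance past a brace-balanced {...} starting at spec[i] == '{'."""
--     if i >= len(spec) or spec[i] != '{':
--         return i
--     return _skip(spec, i)
-- ===== Notes on version B (the rewrite author's own statement) =====
-- stated objective: alternative
-- what changed: Replaces the single shared depth-counter loop by a recursive helper that treats each nested {...} group as a subproblem: skip the guarded group by recursing on every nested '{' and returning right after the first unmatched '}'.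
import Mathlib
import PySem

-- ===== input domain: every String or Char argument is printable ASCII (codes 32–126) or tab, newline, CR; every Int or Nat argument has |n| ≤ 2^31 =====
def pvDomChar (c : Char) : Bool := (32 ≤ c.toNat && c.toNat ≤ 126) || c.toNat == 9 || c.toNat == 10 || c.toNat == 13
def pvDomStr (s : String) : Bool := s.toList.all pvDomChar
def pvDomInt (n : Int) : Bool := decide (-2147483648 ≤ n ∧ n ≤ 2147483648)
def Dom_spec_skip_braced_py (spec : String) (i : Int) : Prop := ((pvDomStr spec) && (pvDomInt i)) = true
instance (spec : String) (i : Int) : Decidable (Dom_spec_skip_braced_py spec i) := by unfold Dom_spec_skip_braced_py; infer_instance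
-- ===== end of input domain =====

-- B replaces A's shared depth-counter loop by a recursive helper that skips each
-- nested { ... } group as a subproblem (objective: alternative decomposition).

-- ===== PORT A =====
-- A's while-loop: scan from i keeping a depth counter; on '}' dropping depth to 0 return i+1.
-- pyGet? = none (i < -len) is where Python raises IndexError: unreachable inside Pre_, returns i.
def pvLoopA (cs : List Char) (i depth : Int) : Int :=
  if _hk : i < (cs.length : Int) then
    match PySem.List.pyGet? cs i with
    | some c =>
        if c = '{' then pvLoopA cs (i + 1) (depth + 1)
        else if c = '}' then
          if depth - 1 = 0 then i + 1 else pvLoopA cs (i + 1) (depth - 1)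
        else pvLoopA cs (i + 1) depth
    | none => i   -- Python raises here; outside Pre_
  else i
  termination_by ((cs.length : Int) - i).toNat
  decreasing_by all_goals · omega

def spec_skip_braced_py (spec : String) (i : Int) : Int :=
  if (spec.toList.length : Int) ≤ i then i
  else
    match PySem.List.pyGet? spec.toList i with
    | none => i        -- Python raises IndexError here; outside Pre_
    | some c => if c ≠ '{' then i else pvLoopA spec.toList i 0

-- ===== PORT B =====
-- Source B's _skip(spec, j) is `k = j+1` followed by this while-loop; the '{' branch
-- `k = _skip(spec, k)` is therefore `pvSkipB cs fuel (k+1)` and the loop continues on its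
-- result. The fuel argument only makes the nested recursion structurally total; it is
-- never exhausted when started with (len - k).toNat < fuel (see pvLoopA_skipB below).
def pvSkipB (cs : List Char) : Nat → Int → Int
  | 0, k => k
  | fuel + 1, k =>
    if k < (cs.length : Int) then
      match PySem.List.pyGet? cs k with
      | some '}' => k + 1
      | some '{' => pvSkipB cs fuel (pvSkipB cs fuel (k + 1))
      | _ => pvSkipB cs fuel (k + 1)   -- other char, or none (Python raises; outside Pre_)
    else k

def spec_skip_braced_py_alt (spec : String) (i : Int) : Int :=
  if (spec.toList.length : Int) ≤ i then i
  else
    match PySem.List.pyGet? spec.toList i with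
    | none => i        -- Python raises IndexError here; outside Pre_
    | some c =>
      if c ≠ '{' then i
      else pvSkipB spec.toList ((spec.toList.length : Int) - i).toNat (i + 1)   -- _skip(spec, i): loop starts at i+1

-- ===== PRECONDITION & SPEC =====
-- Pre_ excludes exactly the inputs where Python A raises IndexError: i < -len(spec)
-- (the guard's spec[i] with a negative index out of range).
def Pre_spec_skip_braced_py (spec : String) (i : Int) : Prop :=
  -(spec.toList.length : Int) ≤ i
instance (spec : String) (i : Int) : Decidable (Pre_spec_skip_braced_py spec i) := by
  unfold Pre_spec_skip_braced_py; infer_instance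

def pvWitness_spec_skip_braced_py : String × Int := ("{a{b}}", 0)

def Spec_spec_skip_braced_py (spec : String) (i : Int) (out : Int) : Prop := out = spec_skip_braced_py_alt spec i
instance (spec : String) (i : Int) (out : Int) : Decidable (Spec_spec_skip_braced_py spec i out) := by unfold Spec_spec_skip_braced_py; infer_instance

-- ===== CLAIM (what is proved, stated in full; the proofs are below) =====
def Claim_equal_spec_skip_braced_py : Prop := ∀ (spec : String) (i : Int), Dom_spec_skip_braced_py spec i → Pre_spec_skip_braced_py spec i → Spec_spec_skip_braced_py spec i (spec_skip_braced_py spec i)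

-- ===== LEMMAS AND PROOFS =====

-- pvSkipB never moves left.
theorem pvSkipB_le (cs : List Char) (fuel : Nat) : ∀ k : Int, k ≤ pvSkipB cs fuel k := by
  induction fuel with
  | zero => intro k; simp [pvSkipB]
  | succ n ih =>
    intro k
    simp only [pvSkipB]
    split
    · split
      · omega
      · have h1 := ih (k + 1)
        have h2 := ih (pvSkipB cs n (k + 1))
        omega
      · have h1 := ih (k + 1)
        omega
    · omega

-- a some-value at every in-range (possibly negative, ≥ -len) index
theorem pvGet_some (cs : List Char) (k : Int) (hlo : -(cs.length : Int) ≤ k)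
    (hhi : k < (cs.length : Int)) : ∃ c, PySem.List.pyGet? cs k = some c := by
  cases hg : PySem.List.pyGet? cs k with
  | some c => exact ⟨c, rfl⟩
  | none =>
    rw [PySem.List.pyGet?_eq_none_iff] at hg
    exact absurd ⟨hlo, hhi⟩ hg

-- main correspondence: A's loop at depth 1 is B's skip-loop, and each extra unit of
-- depth peels exactly one skip.
theorem pvLoopA_skipB (cs : List Char) (F : Nat) : ∀ (k : Int),
    -(cs.length : Int) ≤ k → ((cs.length : Int) - k).toNat < F →
    (pvLoopA cs k 1 = pvSkipB cs F k ∧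
      ∀ d : Int, 1 ≤ d → pvLoopA cs k (d + 1) = pvLoopA cs (pvSkipB cs F k) d) := by
  induction F with
  | zero => omega
  | succ n ih =>
    intro k hlo hF
    by_cases hk : k < (cs.length : Int)
    · obtain ⟨c, hg⟩ := pvGet_some cs k hlo hk
      have hloopA : ∀ d : Int, pvLoopA cs k d =
          if c = '{' then pvLoopA cs (k + 1) (d + 1)
          else if c = '}' then (if d - 1 = 0 then k + 1 else pvLoopA cs (k + 1) (d - 1))
          else pvLoopA cs (k + 1) d := by
        intro d; rw [pvLoopA, dif_pos hk, hg]
      have hskip : pvSkipB cs (n + 1) k =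
          if c = '}' then k + 1
          else if c = '{' then pvSkipB cs n (pvSkipB cs n (k + 1))
          else pvSkipB cs n (k + 1) := by
        rw [pvSkipB, if_pos hk, hg]
        by_cases h1 : c = '}'
        · subst h1; simp
        · by_cases h2 : c = '{'
          · subst h2; simp
          · rw [if_neg h1, if_neg h2]
            split <;> simp_all
      have hlo1 : -(cs.length : Int) ≤ k + 1 := by omega
      have hF1 : ((cs.length : Int) - (k + 1)).toNat < n := by omega
      by_cases h1 : c = '}'
      · subst h1
        have h2 : ¬ (('}' : Char) = '{') := by decide
        constructor
        · rw [hloopA, if_neg h2, if_pos rfl, if_pos (by norm_num : (1 : Int) - 1 = 0),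
            hskip, if_pos rfl]
        · intro d hd
          rw [hloopA, if_neg h2, if_pos rfl, if_neg (by omega : ¬ d + 1 - 1 = 0),
            hskip, if_pos rfl, (by omega : d + 1 - 1 = d)]
      · by_cases h2 : c = '{'
        · subst h2
          have h1' : ¬ (('{' : Char) = '}') := by decide
          have hr := pvSkipB_le cs n (k + 1)
          have hrlo : -(cs.length : Int) ≤ pvSkipB cs n (k + 1) := by omega
          have hrF : ((cs.length : Int) - pvSkipB cs n (k + 1)).toNat < n := by omega
          constructor
          · rw [hloopA, if_pos rfl, hskip, if_neg h1', if_pos rfl,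
              (ih (k + 1) hlo1 hF1).2 1 le_rfl,
              (ih (pvSkipB cs n (k + 1)) hrlo hrF).1]
          · intro d hd
            rw [hloopA, if_pos rfl, hskip, if_neg h1', if_pos rfl,
              (ih (k + 1) hlo1 hF1).2 (d + 1) (by omega),
              (ih (pvSkipB cs n (k + 1)) hrlo hrF).2 d hd]
        · have hA : ∀ d : Int, pvLoopA cs k d = pvLoopA cs (k + 1) d := by
            intro d; rw [hloopA, if_neg h2, if_neg h1]
          have hBs : pvSkipB cs (n + 1) k = pvSkipB cs n (k + 1) := by
            rw [hskip, if_neg h1, if_neg h2]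
          constructor
          · rw [hA 1, hBs]
            exact (ih (k + 1) hlo1 hF1).1
          · intro d hd
            rw [hA (d + 1), hBs]
            exact (ih (k + 1) hlo1 hF1).2 d hd
    · have hB : pvSkipB cs (n + 1) k = k := by rw [pvSkipB, if_neg hk]
      have hA : ∀ d : Int, pvLoopA cs k d = k := by
        intro d; rw [pvLoopA, dif_neg hk]
      constructor
      · rw [hA 1, hB]
      · intro d hd; rw [hA (d + 1), hB, hA d]

-- ===== VERDICT (by name: the statement is the Claim_ definition above) =====
theorem spec_skip_braced_py_spec : Claim_equal_spec_skip_braced_py := by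
  unfold Claim_equal_spec_skip_braced_py
  intro spec i _ hpre
  unfold Spec_spec_skip_braced_py spec_skip_braced_py spec_skip_braced_py_alt
  by_cases hge : (spec.toList.length : Int) ≤ i
  · rw [if_pos hge, if_pos hge]
  · rw [if_neg hge, if_neg hge]
    have hpre' : -(spec.toList.length : Int) ≤ i := hpre
    obtain ⟨c, hg⟩ := pvGet_some spec.toList i hpre' (by omega)
    rw [hg]
    show (if c ≠ '{' then i else pvLoopA spec.toList i 0) =
      (if c ≠ '{' then i else pvSkipB spec.toList ((spec.toList.length : Int) - i).toNat (i + 1))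
    by_cases hc : c = '{'
    · subst hc
      rw [if_neg (by decide : ¬ (('{' : Char) ≠ '{')),
        if_neg (by decide : ¬ (('{' : Char) ≠ '{'))]
      -- unfold one step of A's loop: the first char is '{', depth becomes 1
      rw [pvLoopA, dif_pos (by omega : i < (spec.toList.length : Int)), hg]
      show pvLoopA spec.toList (i + 1) (0 + 1) = _
      rw [(by norm_num : (0 : Int) + 1 = 1)]
      exact (pvLoopA_skipB spec.toList (((spec.toList.length : Int) - i).toNat)
        (i + 1) (by omega) (by omega)).1
    · rw [if_pos hc, if_pos hc]
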